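-- pv_equiv track=rewrite | github.com/Rufflewind/_urandom | bernoulli.py | euler_zigzag
-- ===== SOURCE A (Python) =====
-- def euler_zigzag(n):
--     '''
--     Returns an iterator that generates the first `n` Euler zigzag numbers
--     (sequence A000111, also known as up/down numbers) as `int`s.
--
--     The sequence is computed using the Seidel triangle method.
--     '''
--     if n <= 0:
--         return
--     center = (n - 3) // 2 + 1
--     row = [0] * n
--     row[center] = 1
--     for i in range(-1, n - 1):
--         offset = i // 2
--         length = i  + 1
--         if i % 2 == 1:
--             start = center - offset
--             stop  = start  + length
--             for j in range(start, stop):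
--                 row[j] += row[j - 1]
--             yield row[stop - 1]
--         else:
--             start = center + offset
--             stop  = start  - length
--             for j in range(start, stop, -1):
--                 row[j] += row[j + 1]
--             yield row[stop + 1]
-- ===== SOURCE B (Python) =====
-- def euler_zigzag(n):
--     '''
--     Returns an iterator that generates the first `n` Euler zigzag numbers
--     (sequence A000111) as `int`s, via the boustrophedon transform on a
--     growing triangle row (no preallocated center-indexed array).
--     '''
--     row = [1]
--     k = 0
--     while k < n:
--         yield row[-1]
--         new = [0]
--         for x in reversed(row):
--             new.append(new[-1] + x)
--         row = new
--         k += 1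
-- ===== Notes on version B (the rewrite author's own statement) =====
-- stated objective: alternative
-- what changed: Replaces the preallocated n-cell center-indexed array updated in place by alternating index sweeps with a growing triangle row rebuilt each step as a cumulative sum of its reversal (pure boustrophedon transform), reading each zigzag number off the row's last element.
import Mathlib
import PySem

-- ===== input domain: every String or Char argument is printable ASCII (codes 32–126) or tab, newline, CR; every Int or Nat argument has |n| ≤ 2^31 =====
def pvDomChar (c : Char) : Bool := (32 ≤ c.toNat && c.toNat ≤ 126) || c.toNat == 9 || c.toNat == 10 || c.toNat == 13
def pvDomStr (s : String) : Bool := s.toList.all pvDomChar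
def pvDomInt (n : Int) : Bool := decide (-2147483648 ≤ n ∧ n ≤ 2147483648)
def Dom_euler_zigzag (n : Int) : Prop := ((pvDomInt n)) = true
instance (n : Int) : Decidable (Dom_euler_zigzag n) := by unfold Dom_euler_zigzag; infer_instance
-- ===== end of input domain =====

-- B replaces A's preallocated center-indexed array (updated in place by alternating
-- index sweeps) with a growing triangle row rebuilt each step as the cumulative sum
-- of its reversal (pure boustrophedon transform); alternative decomposition, same cost.


-- ===== PORT A =====
-- loop body of A's 'for i in range(-1, n - 1)' (state = (row, yielded values))
def azBody (center : Int) (s : List Int × List Int) (i : Int) : List Int × List Int :=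
  let offset := PySem.Int.floordiv i 2
  let length := i + 1
  if PySem.Int.mod i 2 = 1 then
    let start := center - offset
    let stop := start + length
    let row := (PySem.List.pyRange start stop 1).foldl
      (fun r j => PySem.List.pySetD r j (PySem.List.pyGetD r j 0 + PySem.List.pyGetD r (j - 1) 0)) s.1
    (row, s.2 ++ [PySem.List.pyGetD row (stop - 1) 0])
  else
    let start := center + offset
    let stop := start - length
    let row := (PySem.List.pyRange start stop (-1)).foldl
      (fun r j => PySem.List.pySetD r j (PySem.List.pyGetD r j 0 + PySem.List.pyGetD r (j + 1) 0)) s.1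
    (row, s.2 ++ [PySem.List.pyGetD row (stop + 1) 0])

def euler_zigzag (n : Int) : List Int :=
  if n ≤ 0 then []
  else
    let center := PySem.Int.floordiv (n - 3) 2 + 1
    let row := PySem.List.pySetD (List.replicate n.toNat 0) center 1
    ((PySem.List.pyRange (-1) (n - 1) 1).foldl (azBody center) (row, [])).2

-- ===== PORT B =====
-- one step of B's while loop: new = [0]; for x in reversed(row): new.append(new[-1] + x)
def altStep (row : List Int) : List Int :=
  row.reverse.foldl (fun new x => new ++ [PySem.List.pyGetD new (-1) 0 + x]) [0]

-- B's 'while k < n' loop, running (n - k) more times; yields row[-1] each turn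
def altLoop : List Int → Nat → List Int
  | _, 0 => []
  | row, f + 1 => PySem.List.pyGetD row (-1) 0 :: altLoop (altStep row) f

def euler_zigzag_alt (n : Int) : List Int := altLoop [1] n.toNat

-- ===== PRECONDITION & SPEC =====
def Spec_euler_zigzag (n : Int) (out : List Int) : Prop := out = euler_zigzag_alt n
instance (n : Int) (out : List Int) : Decidable (Spec_euler_zigzag n out) := by unfold Spec_euler_zigzag; infer_instance

-- ===== CLAIM (what is proved, stated in full; the proofs are below) =====
def Claim_equal_euler_zigzag : Prop := ∀ (n : Int), Dom_euler_zigzag n → Spec_euler_zigzag n (euler_zigzag n)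


-- ===== LEMMAS AND PROOFS =====

-- cumulative sums of a list, starting from accumulator s (spec of B's inner loop)
def csum : Int → List Int → List Int
  | _, [] => []
  | s, x :: xs => (s + x) :: csum (s + x) xs
def brow : Nat → List Int
  | 0 => [1]
  | k + 1 => altStep (brow k)
def zy (k : Nat) : Int := (brow k).getLastD 0
theorem csum_length (s : Int) (xs : List Int) : (csum s xs).length = xs.length := by
  induction xs generalizing s with
  | nil => rfl
  | cons x xs ih => simp [csum, ih]
theorem pyGetD_last (acc : List Int) (h : acc ≠ []) :
    PySem.List.pyGetD acc (-1) 0 = acc.getLastD 0 := by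
  rw [PySem.List.pyGetD_neg_one acc 0 h]
  simp [List.getLastD_eq_getLast?, List.getLast?_eq_some_getLast h]
theorem foldl_csum (xs : List Int) : ∀ (acc : List Int), acc ≠ [] →
    xs.foldl (fun new x => new ++ [PySem.List.pyGetD new (-1) 0 + x]) acc
      = acc ++ csum (acc.getLastD 0) xs := by
  induction xs with
  | nil => intro acc h; simp [csum]
  | cons x xs ih =>
    intro acc h
    rw [List.foldl_cons, ih _ (by simp), pyGetD_last acc h]
    simp [csum]
theorem altStep_eq (row : List Int) : altStep row = 0 :: csum 0 row.reverse := by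
  have := foldl_csum row.reverse [0] (by simp)
  simp [altStep] at this ⊢
  exact this
theorem brow_length (k : Nat) : (brow k).length = k + 1 := by
  induction k with
  | zero => rfl
  | succ k ih => simp [brow, altStep_eq, csum_length, ih]
theorem brow_ne_nil (k : Nat) : brow k ≠ [] := by
  have := brow_length k; intro h; simp [h] at this
theorem altLoop_brow : ∀ (f k : Nat), altLoop (brow k) f = (List.range f).map (fun t => zy (k + t)) := by
  intro f
  induction f with
  | zero => intro k; rfl
  | succ f ih =>
    intro k
    rw [List.range_succ_eq_map]
    show PySem.List.pyGetD (brow k) (-1) 0 :: altLoop (brow (k+1)) f = _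
    rw [ih (k+1)]
    rw [pyGetD_last (brow k) (brow_ne_nil k)]
    simp only [zy, List.map_cons, List.map_map, Nat.add_zero]
    congr 1
    apply List.map_congr_left; intro t _
    have : k + 1 + t = k + Nat.succ t := by omega
    simp [Function.comp, this]
theorem getD_append_mid (A rest : List Int) (x : Int) :
    (A ++ x :: rest).getD A.length 0 = x := by
  simp [List.getD]
theorem getD_append_last (A rest : List Int) (h : A ≠ []) :
    (A ++ rest).getD (A.length - 1) 0 = A.getLastD 0 := by
  have hl : 0 < A.length := List.length_pos_iff.mpr h
  rw [List.getD, List.getElem?_append_left (by omega)]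
  simp [List.getLastD_eq_getLast?, List.getLast?_eq_getElem?, Nat.sub_lt hl]
theorem set_append_mid (A rest : List Int) (x v : Int) :
    (A ++ x :: rest).set A.length v = A ++ v :: rest := by
  rw [List.set_append_right _ _ (Nat.le_refl A.length)]
  simp
theorem fwd_sweep (u : List Int) : ∀ (A B : List Int), A ≠ [] →
    (PySem.List.pyRange (A.length : Int) ((A.length : Int) + u.length) 1).foldl
      (fun r j => PySem.List.pySetD r j (PySem.List.pyGetD r j 0 + PySem.List.pyGetD r (j - 1) 0))
      (A ++ u ++ B)
      = A ++ csum (A.getLastD 0) u ++ B := by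
  induction u with
  | nil =>
    intro A B h
    rw [PySem.List.pyRange_one_eq_nil (by simp)]
    simp [csum]
  | cons x u ih =>
    intro A B h
    have hl : 0 < A.length := List.length_pos_iff.mpr h
    rw [PySem.List.pyRange_one_cons (by push_cast [List.length_cons]; omega), List.foldl_cons]
    have e1 : PySem.List.pyGetD (A ++ (x :: u) ++ B) (A.length : Int) 0 = x := by
      rw [PySem.List.pyGetD_natCast]
      simpa using getD_append_mid A (u ++ B) x
    have e2 : PySem.List.pyGetD (A ++ (x :: u) ++ B) ((A.length : Int) - 1) 0 = A.getLastD 0 := by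
      have : ((A.length : Int) - 1) = ((A.length - 1 : Nat) : Int) := by push_cast [hl]; omega
      rw [this, PySem.List.pyGetD_natCast]
      have := getD_append_last A ((x :: u) ++ B) h
      simp at this ⊢
      exact this
    have e3 : PySem.List.pySetD (A ++ (x :: u) ++ B) (A.length : Int) (x + A.getLastD 0)
        = (A ++ [x + A.getLastD 0]) ++ u ++ B := by
      rw [PySem.List.pySetD_natCast]
      have := set_append_mid A (u ++ B) x (x + A.getLastD 0)
      simpa using this
    rw [e1, e2, e3]
    have ihx := ih (A ++ [x + A.getLastD 0]) B (by simp)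
    have hr : PySem.List.pyRange ((A.length : Int) + 1) ((A.length : Int) + ((x :: u).length : Int)) 1
        = PySem.List.pyRange (((A ++ [x + A.getLastD 0]).length : Nat) : Int)
        ((((A ++ [x + A.getLastD 0]).length : Nat) : Int) + u.length) 1 := by
      congr 1 <;> simp only [List.length_append, List.length_cons, List.length_nil] <;> omega
    rw [hr, ihx]
    simp only [List.getLastD_concat, csum, List.append_assoc, List.cons_append, List.nil_append]
    rw [Int.add_comm x (A.getLastD 0)]
theorem down_sweep (u : List Int) : ∀ (A : List Int) (b : Int) (B' : List Int),
    (PySem.List.pyRange ((A.length : Int) + u.length - 1) ((A.length : Int) - 1) (-1)).foldl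
      (fun r j => PySem.List.pySetD r j (PySem.List.pyGetD r j 0 + PySem.List.pyGetD r (j + 1) 0))
      (A ++ u ++ b :: B')
      = A ++ (csum b u.reverse).reverse ++ b :: B' := by
  induction u using List.reverseRecOn with
  | nil =>
    intro A b B'
    rw [PySem.List.pyRange_neg_one_eq_nil (by simp)]
    simp [csum]
  | append_singleton u₀ x ih =>
    intro A b B'
    have hc : (A.length : Int) + ((u₀ ++ [x]).length : Int) - 1 = (((A ++ u₀).length : Nat) : Int) := by
      simp only [List.length_append, List.length_cons, List.length_nil]; push_cast; omega
    rw [hc, PySem.List.pyRange_neg_one_cons (by simp only [List.length_append, List.length_cons, List.length_nil]; push_cast; omega), List.foldl_cons]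
    have hre : A ++ (u₀ ++ [x]) ++ b :: B' = (A ++ u₀) ++ x :: (b :: B') := by simp
    rw [hre]
    have e1 : PySem.List.pyGetD ((A ++ u₀) ++ x :: (b :: B')) (((A ++ u₀).length : Nat) : Int) 0 = x := by
      rw [PySem.List.pyGetD_natCast]
      exact getD_append_mid (A ++ u₀) (b :: B') x
    have e2 : PySem.List.pyGetD ((A ++ u₀) ++ x :: (b :: B')) ((((A ++ u₀).length : Nat) : Int) + 1) 0 = b := by
      have hc2 : (((A ++ u₀).length : Nat) : Int) + 1 = ((((A ++ u₀) ++ [x]).length : Nat) : Int) := by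
        simp only [List.length_append, List.length_cons, List.length_nil]; push_cast; omega
      rw [hc2, PySem.List.pyGetD_natCast]
      simp
    have e3 : PySem.List.pySetD ((A ++ u₀) ++ x :: (b :: B')) (((A ++ u₀).length : Nat) : Int) (x + b)
        = A ++ u₀ ++ (x + b) :: (b :: B') := by
      rw [PySem.List.pySetD_natCast]
      simp
    rw [e1, e2, e3]
    have ihx := ih A (x + b) (b :: B')
    have hr : PySem.List.pyRange ((((A ++ u₀).length : Nat) : Int) - 1) ((A.length : Int) - 1) (-1)
        = PySem.List.pyRange ((A.length : Int) + (u₀.length : Int) - 1) ((A.length : Int) - 1) (-1) := by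
      congr 1; simp only [List.length_append, List.length_cons, List.length_nil]; push_cast; omega
    rw [hr, ihx]
    rw [show (u₀ ++ [x]).reverse = x :: u₀.reverse by simp]
    simp only [csum, List.reverse_cons, List.append_assoc, List.cons_append, List.nil_append]
    rw [Int.add_comm b x]

theorem brow_succ (k : Nat) : brow (k + 1) = 0 :: csum 0 (brow k).reverse := by
  rw [show brow (k+1) = altStep (brow k) from rfl, altStep_eq]

theorem csum_ne_nil (s : Int) (l : List Int) (h : l ≠ []) : csum s l ≠ [] := by
  intro hc; have := csum_length s l
  rw [hc] at this; exact h (List.length_eq_zero_iff.mp this.symm)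

theorem zy_eq (k : Nat) : zy (k + 1) = (csum 0 (brow k).reverse).getLastD 0 := by
  have hne : csum 0 (brow k).reverse ≠ [] := csum_ne_nil _ _ (by simp [brow_ne_nil k])
  rw [zy, brow_succ]
  rw [List.getLastD_eq_getLast?, List.getLast?_eq_some_getLast (by simp), Option.getD_some,
    List.getLast_cons hne, List.getLastD_eq_getLast?, List.getLast?_eq_some_getLast hne, Option.getD_some]

theorem replicate_getLastD (m : Nat) : (List.replicate m (0 : Int)).getLastD 0 = 0 := by
  induction m with
  | zero => rfl
  | succ m ih => rw [List.replicate_succ'] ; simp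

theorem exists_last (l : List Int) (h : l ≠ []) : ∃ t, l = t ++ [l.getLastD 0] := by
  induction l using List.reverseRecOn with
  | nil => exact absurd rfl h
  | append_singleton t x _ => exact ⟨t, by simp⟩

theorem set_replicate_mid (n c : Nat) (h : c < n) :
    (List.replicate n (0 : Int)).set c 1 = List.replicate c 0 ++ 1 :: List.replicate (n - 1 - c) 0 := by
  induction c generalizing n with
  | zero =>
    obtain ⟨m, rfl⟩ : ∃ m, n = m + 1 := ⟨n - 1, by omega⟩
    simp [List.replicate_succ]
  | succ c ih =>
    obtain ⟨m, rfl⟩ : ∃ m, n = m + 1 := ⟨n - 1, by omega⟩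
    rw [List.replicate_succ, List.replicate_succ (n := c),
      show m + 1 - 1 - (c + 1) = m - 1 - c from by omega]
    simp [List.set_cons_succ, ih m (by omega)]

-- the shape of A's state after k iterations of the outer loop
def aState (n c k : Nat) : List Int × List Int :=
  (List.replicate (c + 1 - (k + 1) / 2) 0
     ++ (if k % 2 = 1 then brow (k - 1) else (brow (k - 1)).reverse)
     ++ List.replicate (n - (c + 1 - (k + 1) / 2) - k) 0,
   (List.range k).map zy)

theorem main_inv (n c : Nat) (hn : 1 ≤ n) (hc : c = (n - 1) / 2) :
    ∀ k, 1 ≤ k → k ≤ n →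
      (PySem.List.pyRange (-1) ((k : Int) - 1) 1).foldl (azBody (c : Int))
        (PySem.List.pySetD (List.replicate n 0) (c : Int) 1, [])
      = aState n c k := by
  intro k
  induction k with
  | zero => omega
  | succ k ih =>
    intro _ hkn
    by_cases hk1 : k = 0
    · -- base case k+1 = 1 : the i = -1 iteration
      subst hk1
      have hcn : c < n := by omega
      have h0 : ((0 + 1 : Nat) : Int) - 1 = 0 := by norm_num
      rw [h0, PySem.List.pyRange_one_cons (by omega), PySem.List.pyRange_one_eq_nil (by omega),
        List.foldl_cons, List.foldl_nil]
      have hinit : PySem.List.pySetD (List.replicate n (0 : Int)) (c : Int) 1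
          = List.replicate c (0 : Int) ++ (1 : Int) :: List.replicate (n - 1 - c) 0 :=
        by rw [PySem.List.pySetD_natCast]; exact set_replicate_mid n c hcn
      rw [hinit]
      simp only [azBody]
      rw [if_pos (show PySem.Int.mod (-1) 2 = 1 by decide)]
      rw [show PySem.Int.floordiv (-1) 2 = -1 by decide]
      have hr0 : PySem.List.pyRange ((c : Int) - -1) ((c : Int) - -1 + (-1 + 1)) 1 = [] :=
        PySem.List.pyRange_one_eq_nil (by omega)
      rw [hr0, List.foldl_nil]
      have hix : (c : Int) - -1 + (-1 + 1) - 1 = ((c : Nat) : Int) := by omega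
      rw [hix, PySem.List.pyGetD_natCast]
      have hval : (List.replicate c (0 : Int) ++ (1 : Int) :: List.replicate (n - 1 - c) 0).getD c 0 = 1 := by
        have := getD_append_mid (List.replicate c (0 : Int)) (List.replicate (n - 1 - c) 0) 1
        simpa using this
      rw [hval]
      show _ = aState n c 1
      unfold aState
      simp [brow, zy]
      omega
    · -- inductive step
      have hk : 1 ≤ k := by omega
      have ihs := ih hk (by omega)
      have hsplit : PySem.List.pyRange (-1) (((k + 1 : Nat) : Int) - 1) 1
          = PySem.List.pyRange (-1) ((k : Int) - 1) 1 ++ [(k : Int) - 1] := by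
        have : ((k + 1 : Nat) : Int) - 1 = ((k : Int) - 1) + 1 := by push_cast; omega
        rw [this, PySem.List.pyRange_one_succ_right (by omega)]
      rw [hsplit, List.foldl_append, ihs, List.foldl_cons, List.foldl_nil]
      by_cases hpar : k % 2 = 1
      · -- k odd: iteration i = k-1 is even -> downward sweep
        have hdiv : c = (n - 1) / 2 := hc
        set m := (k - 1) / 2 with hm
        have hk2 : k = 2 * m + 1 := by omega
        have hcm : m ≤ c := by omega
        have hq1 : 1 ≤ n - (c - m) - k := by omega
        have hpk : c + 1 - (k + 1) / 2 = c - m := by omega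
        simp only [aState, if_pos hpar, azBody]
        rw [if_neg (by rw [PySem.Int.mod_eq_emod_of_pos (by norm_num)]; omega)]
        rw [show PySem.Int.floordiv ((k : Int) - 1) 2 = (m : Int) from by
          rw [PySem.Int.floordiv_eq_ediv_of_pos (by norm_num)]; omega]
        rw [hpk, show n - (c - m) - k = (n - (c - m) - k - 1) + 1 from by omega,
          List.replicate_succ]
        have hne : csum 0 (brow (k - 1)).reverse ≠ [] := csum_ne_nil _ _ (by simp [brow_ne_nil])
        obtain ⟨t, ht⟩ := exists_last _ hne
        have hrange : PySem.List.pyRange ((c : Int) + (m : Int)) ((c : Int) + (m : Int) - ((k : Int) - 1 + 1)) (-1)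
            = PySem.List.pyRange (((List.replicate (c - m) (0 : Int)).length : Int) + ((brow (k - 1)).length : Int) - 1)
                (((List.replicate (c - m) (0 : Int)).length : Int) - 1) (-1) := by
          congr 1 <;> simp [brow_length] <;> omega
        rw [hrange, down_sweep (brow (k - 1)) (List.replicate (c - m) 0) 0 (List.replicate (n - (c - m) - k - 1) 0)]
        rw [ht]
        have hyix : (c : Int) + (m : Int) - ((k : Int) - 1 + 1) + 1 = (((c - m : Nat)) : Int) := by
          push_cast; omega
        rw [hyix]
        have hval : PySem.List.pyGetD
            (List.replicate (c - m) (0 : Int) ++ (t ++ [(csum 0 (brow (k - 1)).reverse).getLastD 0]).reverse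
              ++ 0 :: List.replicate (n - (c - m) - k - 1) 0) (((c - m : Nat)) : Int) 0
            = (csum 0 (brow (k - 1)).reverse).getLastD 0 := by
          rw [PySem.List.pyGetD_natCast]
          simpa using getD_append_mid (List.replicate (c - m) (0 : Int))
            (t.reverse ++ 0 :: List.replicate (n - (c - m) - k - 1) 0)
            ((csum 0 (brow (k - 1)).reverse).getLastD 0)
        rw [hval]
        have hzy : (csum 0 (brow (k - 1)).reverse).getLastD 0 = zy k := by
          rw [← zy_eq (k - 1), show k - 1 + 1 = k from by omega]
        rw [hzy]
        show _ = aState n c (k + 1)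
        have hbrk : brow k = 0 :: csum 0 (brow (k - 1)).reverse := by
          rw [show k = (k - 1) + 1 from by omega, brow_succ, show k - 1 + 1 - 1 = k - 1 from by omega]
        simp only [aState, if_neg (by omega : ¬ (k + 1) % 2 = 1),
          show c + 1 - (k + 1 + 1) / 2 = c - m from by omega,
          show n - (c - m) - (k + 1) = n - (c - m) - k - 1 from by omega]
        rw [List.range_succ, Prod.mk.injEq]
        refine ⟨?_, by simp⟩
        rw [Nat.add_sub_cancel, hbrk, List.reverse_cons, ht, List.reverse_append, hzy]
        simp
      · -- k even (k ≥ 2): iteration i = k-1 is odd -> forward sweep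
        have hdiv : c = (n - 1) / 2 := hc
        set m := (k - 2) / 2 with hm
        have hk2 : k = 2 * m + 2 := by omega
        have hcm : m + 1 ≤ c := by omega
        have hpk : c + 1 - (k + 1) / 2 = c - m := by omega
        have hpk1 : 1 ≤ c - m := by omega
        simp only [aState, if_neg hpar, azBody]
        rw [if_pos (show PySem.Int.mod ((k : Int) - 1) 2 = 1 from by
          rw [PySem.Int.mod_eq_emod_of_pos (by norm_num)]; omega)]
        rw [show PySem.Int.floordiv ((k : Int) - 1) 2 = (m : Int) from by
          rw [PySem.Int.floordiv_eq_ediv_of_pos (by norm_num)]; omega]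
        rw [hpk]
        have hrange : PySem.List.pyRange ((c : Int) - (m : Int)) ((c : Int) - (m : Int) + ((k : Int) - 1 + 1)) 1
            = PySem.List.pyRange (((List.replicate (c - m) (0 : Int)).length : Int))
                (((List.replicate (c - m) (0 : Int)).length : Int) + (((brow (k - 1)).reverse).length : Int)) 1 := by
          congr 1 <;> simp [brow_length] <;> omega
        rw [hrange, fwd_sweep ((brow (k - 1)).reverse) (List.replicate (c - m) 0)
          (List.replicate (n - (c - m) - k) 0) (by simp; omega), replicate_getLastD]
        have hne : csum 0 (brow (k - 1)).reverse ≠ [] := csum_ne_nil _ _ (by simp [brow_ne_nil])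
        obtain ⟨t, ht⟩ := exists_last _ hne
        have hlt : t.length = k - 1 := by
          have h1 := csum_length 0 (brow (k - 1)).reverse
          rw [ht] at h1
          simp [brow_length] at h1
          omega
        rw [ht]
        have hyix : (c : Int) - (m : Int) + ((k : Int) - 1 + 1) - 1
            = (((List.replicate (c - m) (0 : Int) ++ t).length : Nat) : Int) := by
          simp [hlt]; omega
        rw [hyix]
        have hval : PySem.List.pyGetD
            (List.replicate (c - m) (0 : Int) ++ (t ++ [(csum 0 (brow (k - 1)).reverse).getLastD 0])
              ++ List.replicate (n - (c - m) - k) 0)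
            (((List.replicate (c - m) (0 : Int) ++ t).length : Nat) : Int) 0
            = (csum 0 (brow (k - 1)).reverse).getLastD 0 := by
          rw [PySem.List.pyGetD_natCast]
          simpa using getD_append_mid (List.replicate (c - m) (0 : Int) ++ t)
            (List.replicate (n - (c - m) - k) 0) ((csum 0 (brow (k - 1)).reverse).getLastD 0)
        rw [hval]
        have hzy : (csum 0 (brow (k - 1)).reverse).getLastD 0 = zy k := by
          rw [← zy_eq (k - 1), show k - 1 + 1 = k from by omega]
        rw [hzy]
        show _ = aState n c (k + 1)
        have hbrk : brow k = 0 :: csum 0 (brow (k - 1)).reverse := by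
          rw [show k = (k - 1) + 1 from by omega, brow_succ, show k - 1 + 1 - 1 = k - 1 from by omega]
        simp only [aState, if_pos (by omega : (k + 1) % 2 = 1), Nat.add_sub_cancel, hbrk,
          show c + 1 - (k + 1 + 1) / 2 = c - m - 1 from by omega,
          show n - (c - m - 1) - (k + 1) = n - (c - m) - k from by omega]
        rw [List.range_succ, Prod.mk.injEq]
        refine ⟨?_, by simp⟩
        rw [show c - m = (c - m - 1) + 1 from by omega, List.replicate_succ', ht]
        simp [← hzy, List.getLastD_eq_getLast?]

theorem euler_zigzag_spec : Claim_equal_euler_zigzag := by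
  unfold Claim_equal_euler_zigzag
  intro n _
  unfold Spec_euler_zigzag euler_zigzag euler_zigzag_alt
  by_cases hn : n ≤ 0
  · rw [if_pos hn, show n.toNat = 0 from by omega]
    rfl
  · rw [if_neg hn]
    rw [not_le] at hn
    have h1 : 1 ≤ n.toNat := by omega
    have hcenter : PySem.Int.floordiv (n - 3) 2 + 1 = (((n.toNat - 1) / 2 : Nat) : Int) := by
      rw [PySem.Int.floordiv_eq_ediv_of_pos (by norm_num)]; omega
    have hend : n - 1 = ((n.toNat : Nat) : Int) - 1 := by omega
    simp only [hcenter, hend]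
    rw [main_inv n.toNat ((n.toNat - 1) / 2) h1 rfl n.toNat h1 (le_refl _)]
    rw [show ([1] : List Int) = brow 0 from rfl, altLoop_brow n.toNat 0]
    simp [aState]
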